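-- pv_equiv track=rewrite | github.com/Alferdize/Data-Structure-and-Algorithms | Algorithms/binary_search.com/Contiguous_Strictly_Increasing.py | solve
-- ===== SOURCE A (Python) =====
-- def solve(nums):
--     N = len(nums)
--     prefix = [1] * N
--     for i in range(1,N - 1):
--         if nums[i] > nums[i - 1]:
--             prefix[i] = prefix[i - 1] +1
--     suffix = [1] * N
--     for i in range(N - 2, -1, -1):
--         if nums[i] < nums[i + 1]:
--             suffix[i] = suffix[i + 1] + 1
--     ans = max(max(prefix),max(suffix))
--     for i in range(1, N - 1):
--         if nums[i - 1] < nums[i + 1]: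
--             ans = max(ans, prefix[i - 1] + suffix[i + 1])
--     return ans
-- ===== SOURCE B (Python) =====
-- def solve(nums):
--     if not nums:
--         return 0
--     best = 1
--     up = 1        # length of the strictly increasing run ending at the current index
--     prev_up = 0   # run length ending two indices back (0 if none)
--     del1 = 0      # longest run ending here using exactly one interior deletion (0 if none)
--     prev = nums[0]
--     prev2 = None
--     for x in nums[1:]:
--         new_up = up + 1 if x > prev else 1
--         new_del1 = del1 + 1 if (del1 > 0 and x > prev) else 0
--         if prev2 is not None and x > prev2:
--             new_del1 = max(new_del1, prev_up + 1)
--         best = max(best, new_up, new_del1)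
--         prev_up, up, del1 = up, new_up, new_del1
--         prev2, prev = prev, x
--     return best
-- ===== Notes on version B (the rewrite author's own statement) =====
-- stated objective: simpler
-- what changed: Replaced A's two auxiliary prefix/suffix arrays plus a separate bridge scan by a single forward pass keeping three scalars (current run length, best run-with-one-deletion length, running best), O(1) extra space instead of O(n).
-- outside the precondition, e.g. on solve([]): A raises ValueError, B returns 0
import Mathlib
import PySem

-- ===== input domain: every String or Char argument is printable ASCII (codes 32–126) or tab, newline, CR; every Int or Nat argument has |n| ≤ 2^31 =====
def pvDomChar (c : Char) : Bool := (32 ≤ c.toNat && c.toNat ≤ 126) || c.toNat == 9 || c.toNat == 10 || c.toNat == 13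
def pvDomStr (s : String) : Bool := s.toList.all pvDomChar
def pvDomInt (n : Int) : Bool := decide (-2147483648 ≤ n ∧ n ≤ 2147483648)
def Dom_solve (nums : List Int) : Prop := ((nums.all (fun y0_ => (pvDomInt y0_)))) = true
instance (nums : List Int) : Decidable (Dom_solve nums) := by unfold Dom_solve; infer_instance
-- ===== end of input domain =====

-- B replaces A's two prefix/suffix arrays and bridge scan by a single forward pass over
-- scalars (run length, one-deletion run length, running best): simpler, O(1) extra space.

-- ===== PORT A =====
-- prefix array loop: for i in range(1, N-1): if nums[i] > nums[i-1]: prefix[i] = prefix[i-1]+1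
def aPrefix (nums : List Int) : List Int :=
  (PySem.List.pyRange 1 (PySem.List.len nums - 1) 1).foldl
    (fun p i =>
      if PySem.List.pyGetD nums i 0 > PySem.List.pyGetD nums (i - 1) 0 then
        PySem.List.pySetD p i (PySem.List.pyGetD p (i - 1) 0 + 1)
      else p)
    (PySem.List.pyRepeat [(1 : Int)] (PySem.List.len nums))

-- suffix array loop: for i in range(N-2, -1, -1): if nums[i] < nums[i+1]: suffix[i] = suffix[i+1]+1
def aSuffix (nums : List Int) : List Int :=
  (PySem.List.pyRange (PySem.List.len nums - 2) (-1) (-1)).foldl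
    (fun s i =>
      if PySem.List.pyGetD nums i 0 < PySem.List.pyGetD nums (i + 1) 0 then
        PySem.List.pySetD s i (PySem.List.pyGetD s (i + 1) 0 + 1)
      else s)
    (PySem.List.pyRepeat [(1 : Int)] (PySem.List.len nums))

-- max(xs) raises ValueError on an empty list; Pre_solve excludes nums = [], so .getD 0 is never used
def solve (nums : List Int) : Int :=
  (PySem.List.pyRange 1 (PySem.List.len nums - 1) 1).foldl
    (fun a i =>
      if PySem.List.pyGetD nums (i - 1) 0 < PySem.List.pyGetD nums (i + 1) 0 then
        max a (PySem.List.pyGetD (aPrefix nums) (i - 1) 0 + PySem.List.pyGetD (aSuffix nums) (i + 1) 0)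
      else a)
    (max ((PySem.List.max? (aPrefix nums) (fun x => x)).getD 0)
         ((PySem.List.max? (aSuffix nums) (fun x => x)).getD 0))

-- ===== PORT B =====
-- state = (best, up, prev_up, del1, prev, prev2)
def solveAltStep (st : Int × Int × Int × Int × Int × Option Int) (x : Int) :
    Int × Int × Int × Int × Int × Option Int :=
  match st with
  | (best, up, prevUp, del1, prev, prev2) =>
    let newUp : Int := if x > prev then up + 1 else 1
    let newDel1 : Int := if del1 > 0 ∧ x > prev then del1 + 1 else 0
    let newDel1 : Int :=
      match prev2 with
      | some p2 => if x > p2 then max newDel1 (prevUp + 1) else newDel1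
      | none => newDel1
    (max (max best newUp) newDel1, newUp, up, newDel1, x, some prev)

def solve_alt (nums : List Int) : Int :=
  match nums with
  | [] => 0
  | h :: t => (t.foldl solveAltStep (1, 1, 0, 0, h, none)).1

-- ===== PRECONDITION & SPEC =====
-- A raises ValueError (max of an empty list) on nums = []; Pre_ excludes exactly that.
def Pre_solve (nums : List Int) : Prop := nums ≠ []
instance (nums : List Int) : Decidable (Pre_solve nums) := by unfold Pre_solve; infer_instance
def pvWitness_solve : List Int := ([1, 3, 2, 4] : List Int)


def Spec_solve (nums : List Int) (out : Int) : Prop := out = solve_alt nums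
instance (nums : List Int) (out : Int) : Decidable (Spec_solve nums out) := by unfold Spec_solve; infer_instance

-- ===== CLAIM (what is proved, stated in full; the proofs are below) =====
def Claim_equal_solve : Prop := ∀ (nums : List Int), Dom_solve nums → Pre_solve nums → Spec_solve nums (solve nums)

-- ===== LEMMAS AND PROOFS =====

-- run length of the strictly increasing run ending at index i (getD convention, default 0)
def uRun (l : List Int) : Nat → Int
  | 0 => 1
  | i+1 => if l.getD (i+1) 0 > l.getD i 0 then uRun l i + 1 else 1

-- longest strictly increasing run ending at i that deleted exactly one interior element (0 if none)
def dRun (l : List Int) : Nat → Int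
  | 0 => 0
  | 1 => 0
  | i+2 =>
    let a : Int := if dRun l (i+1) > 0 ∧ l.getD (i+2) 0 > l.getD (i+1) 0 then dRun l (i+1) + 1 else 0
    if l.getD (i+2) 0 > l.getD i 0 then max a (uRun l i + 1) else a

-- run length of the strictly increasing run starting at index i
def sRun (l : List Int) (i : Nat) : Int :=
  if h : i + 1 < l.length then
    (if l.getD i 0 < l.getD (i+1) 0 then sRun l (i+1) + 1 else 1)
  else 1
termination_by l.length - i

-- running best of B after processing indices 0..k
def bestB (l : List Int) : Nat → Int
  | 0 => 1
  | k+1 => max (max (bestB l k) (uRun l (k+1))) (dRun l (k+1))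

lemma one_le_uRun (l : List Int) (i : Nat) : 1 ≤ uRun l i := by
  induction i with
  | zero => simp [uRun]
  | succ i ih => simp only [uRun]; split_ifs <;> omega

lemma uRun_le (l : List Int) (i : Nat) : uRun l i ≤ (i : Int) + 1 := by
  induction i with
  | zero => simp [uRun]
  | succ i ih => simp only [uRun]; push_cast; split_ifs <;> omega

lemma one_le_sRun (l : List Int) (i : Nat) : 1 ≤ sRun l i := by
  rw [sRun]
  split_ifs <;> [skip; omega; omega]
  have := one_le_sRun l (i+1)
  omega
termination_by l.length - i

lemma sRun_succ (l : List Int) (i : Nat) (h1 : i + 1 < l.length) (h2 : l.getD i 0 < l.getD (i+1) 0) :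
    sRun l i = sRun l (i+1) + 1 := by
  rw [sRun, dif_pos h1, if_pos h2]

lemma sRun_eq_one (l : List Int) (i : Nat) (h : ¬ (i + 1 < l.length ∧ l.getD i 0 < l.getD (i+1) 0)) :
    sRun l i = 1 := by
  rw [sRun]
  by_cases h1 : i + 1 < l.length
  · have h2 : ¬ l.getD i 0 < l.getD (i+1) 0 := fun h2 => h ⟨h1, h2⟩
    rw [dif_pos h1, if_neg h2]
  · rw [dif_neg h1]

lemma sRun_le (l : List Int) (i : Nat) (hi : i < l.length) : sRun l i ≤ (l.length : Int) - i := by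
  rw [sRun]
  split_ifs with h1 h2
  · have := sRun_le l (i+1) h1
    push_cast at *
    omega
  · omega
  · omega
termination_by l.length - i

lemma s_step (l : List Int) : ∀ (k j : Nat), (k : Int) + 1 < sRun l j →
    j + k + 1 < l.length ∧ l.getD (j+k) 0 < l.getD (j+k+1) 0 := by
  intro k
  induction k with
  | zero =>
    intro j hj
    by_cases hc : j + 1 < l.length ∧ l.getD j 0 < l.getD (j+1) 0
    · simpa using hc
    · rw [sRun_eq_one l j hc] at hj; omega
  | succ k ih =>
    intro j hj
    have hone := one_le_sRun l (j+1)
    by_cases hc : j + 1 < l.length ∧ l.getD j 0 < l.getD (j+1) 0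
    · have hs := sRun_succ l j hc.1 hc.2
      have hj' : (k : Int) + 1 < sRun l (j+1) := by push_cast at hj; omega
      have h' := ih (j+1) hj'
      constructor
      · omega
      · have e1 : j + (k+1) = (j+1) + k := by omega
        have e2 : j + (k+1) + 1 = (j+1) + k + 1 := by omega
        rw [e1]; exact h'.2
    · rw [sRun_eq_one l j hc] at hj; push_cast at hj; omega

lemma s_ext (l : List Int) : ∀ (k j : Nat), 0 < k → (k : Int) ≤ sRun l j → j + k < l.length →
    l.getD (j+k-1) 0 < l.getD (j+k) 0 → (k : Int) + 1 ≤ sRun l j := by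
  intro k
  induction k with
  | zero => omega
  | succ k ih =>
    intro j _ hk hlen hinc
    rcases Nat.eq_zero_or_pos k with hk0 | hkpos
    · subst hk0
      have h1 : j + 1 < l.length := by omega
      have h2 : l.getD j 0 < l.getD (j+1) 0 := by simpa using hinc
      have := sRun_succ l j h1 h2
      have := one_le_sRun l (j+1)
      push_cast
      omega
    · -- k+1 ≤ sRun j with k ≥ 1 forces the first step to be increasing
      by_cases hc : j + 1 < l.length ∧ l.getD j 0 < l.getD (j+1) 0
      · have hs := sRun_succ l j hc.1 hc.2
        have hk' : (k : Int) ≤ sRun l (j+1) := by push_cast at hk; omega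
        have hlen' : (j+1) + k < l.length := by omega
        have hinc' : l.getD ((j+1)+k-1) 0 < l.getD ((j+1)+k) 0 := by
          have e1 : (j+1) + k - 1 = j + (k+1) - 1 := by omega
          have e2 : (j+1) + k = j + (k+1) := by omega
          rw [e1, e2]; exact hinc
        have := ih (j+1) hkpos hk' hlen' hinc'
        push_cast at *
        omega
      · rw [sRun_eq_one l j hc] at hk; push_cast at hk; omega

lemma L1s (l : List Int) : ∀ (i j : Nat), j ≤ i → i < l.length → ((i - j : Nat) : Int) < uRun l i →
    sRun l j = ((i - j : Nat) : Int) + sRun l i := by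
  intro i
  induction i with
  | zero =>
    intro j hj _ _
    interval_cases j
    simp
  | succ i ih =>
    intro j hj hlen hu
    rcases Nat.eq_or_lt_of_le hj with rfl | hj'
    · simp
    · have hj2 : j ≤ i := by omega
      -- the else branch of uRun would give uRun (i+1) = 1, contradicting hu
      by_cases hc : l.getD (i+1) 0 > l.getD i 0
      · have hu' : uRun l (i+1) = uRun l i + 1 := by simp only [uRun]; rw [if_pos hc]
        have hcast : ((i + 1 - j : Nat) : Int) = ((i - j : Nat) : Int) + 1 := by omega
        have hrec : ((i - j : Nat) : Int) < uRun l i := by rw [hu', hcast] at hu; omega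
        have hIH := ih j hj2 (by omega) hrec
        have hs := sRun_succ l i (by omega) hc
        rw [hcast, hIH, hs]
        ring
      · have hu' : uRun l (i+1) = 1 := by simp only [uRun]; rw [if_neg hc]
        rw [hu'] at hu
        omega

lemma u_of_s (l : List Int) : ∀ (k j : Nat), j + k < l.length → (k : Int) < sRun l j →
    (k : Int) + 1 ≤ uRun l (j + k) := by
  intro k
  induction k with
  | zero =>
    intro j _ _
    simpa using one_le_uRun l j
  | succ k ih =>
    intro j hlen hs
    have hstep := s_step l k j (by push_cast at hs ⊢; omega)
    have hih := ih j (by omega) (by push_cast at hs ⊢; omega)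
    have hu : uRun l (j + k + 1) = uRun l (j + k) + 1 := by
      simp only [uRun]; rw [if_pos hstep.2]
    have e : j + (k + 1) = j + k + 1 := by omega
    rw [e, hu]
    push_cast
    omega

lemma d_step_ge (l : List Int) (m : Nat) (h0 : 0 < dRun l (m+1)) (hinc : l.getD (m+1) 0 < l.getD (m+2) 0) :
    dRun l (m+1) + 1 ≤ dRun l (m+2) := by
  have ha : dRun l (m+1) > 0 ∧ l.getD (m+2) 0 > l.getD (m+1) 0 := ⟨h0, hinc⟩
  simp only [dRun, if_pos ha]
  split_ifs with hb
  · exact le_max_left _ _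
  · exact le_refl _

lemma d_bridge_ge (l : List Int) (m : Nat) (hb : l.getD m 0 < l.getD (m+2) 0) :
    uRun l m + 1 ≤ dRun l (m+2) := by
  simp only [dRun]
  rw [if_pos hb]
  exact le_max_right _ _

lemma B2 (l : List Int) : ∀ (k m : Nat), l.getD m 0 < l.getD (m+2) 0 →
    (k : Int) < sRun l (m+2) → uRun l m + 1 + (k : Int) ≤ dRun l (m+2+k) := by
  intro k
  induction k with
  | zero =>
    intro m hb _
    simpa using d_bridge_ge l m hb
  | succ k ih =>
    intro m hb hk
    have hstep := s_step l k (m+2) (by push_cast at hk ⊢; omega)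
    have hih := ih m hb (by push_cast at hk ⊢; omega)
    have hpos : 0 < dRun l (m+2+k) := by
      have := one_le_uRun l m
      omega
    have hd := d_step_ge l (m+1+k) (by
        have e : m+1+k+1 = m+2+k := by omega
        rw [e]; exact hpos)
      (by
        have e1 : m+1+k+1 = m+2+k := by omega
        have e2 : m+1+k+2 = m+2+k+1 := by omega
        rw [e1, e2]; exact hstep.2)
    have e1 : m+1+k+1 = m+2+k := by omega
    have e2 : m+1+k+2 = m+2+(k+1) := by omega
    rw [e1, e2] at hd
    push_cast
    omega

lemma B1 (l : List Int) : ∀ (j : Nat), j < l.length → 0 < dRun l j →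
    ∃ m : Nat, 1 ≤ m ∧ m + 1 ≤ j ∧ l.getD (m-1) 0 < l.getD (m+1) 0 ∧
      dRun l j ≤ uRun l (m-1) + ((j - m : Nat) : Int) ∧ ((j - m : Nat) : Int) ≤ sRun l (m+1) := by
  intro j
  induction j using Nat.strong_induction_on with
  | _ j ih =>
  intro hj hd
  match j, hj, hd, ih with
  | 0, hj, hd, ih => simp [dRun] at hd
  | 1, hj, hd, ih => simp [dRun] at hd
  | (i+2), hj, hd, ih =>
    -- the two candidate bounds
    have hbridge : l.getD i 0 < l.getD (i+2) 0 → dRun l (i+2) ≤ uRun l i + 1 →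
        ∃ m : Nat, 1 ≤ m ∧ m + 1 ≤ i+2 ∧ l.getD (m-1) 0 < l.getD (m+1) 0 ∧
          dRun l (i+2) ≤ uRun l (m-1) + ((i+2 - m : Nat) : Int) ∧ ((i+2 - m : Nat) : Int) ≤ sRun l (m+1) := by
      intro hbr hle
      refine ⟨i+1, by omega, by omega, by simpa using hbr, ?_, ?_⟩
      · have e : i + 2 - (i+1) = 1 := by omega
        rw [e]; simpa using hle
      · have e : i + 2 - (i+1) = 1 := by omega
        rw [e]; simpa using one_le_sRun l (i+2)
    have hchain : (0 < dRun l (i+1) ∧ l.getD (i+1) 0 < l.getD (i+2) 0) →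
        dRun l (i+2) ≤ dRun l (i+1) + 1 →
        ∃ m : Nat, 1 ≤ m ∧ m + 1 ≤ i+2 ∧ l.getD (m-1) 0 < l.getD (m+1) 0 ∧
          dRun l (i+2) ≤ uRun l (m-1) + ((i+2 - m : Nat) : Int) ∧ ((i+2 - m : Nat) : Int) ≤ sRun l (m+1) := by
      rintro ⟨hpos, hinc⟩ hle
      obtain ⟨m, hm1, hm2, hmb, hmd, hms⟩ := ih (i+1) (by omega) (by omega) hpos
      refine ⟨m, hm1, by omega, hmb, ?_, ?_⟩
      · have e : ((i+2 - m : Nat) : Int) = ((i+1 - m : Nat) : Int) + 1 := by omega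
        rw [e]; omega
      · have hk : 0 < i + 1 - m := by omega
        have := s_ext l (i+1-m) (m+1) hk hms (by omega) (by
          have e1 : m + 1 + (i+1-m) - 1 = i + 1 := by omega
          have e2 : m + 1 + (i+1-m) = i + 2 := by omega
          rw [e1, e2]; exact hinc)
        have e : ((i+2 - m : Nat) : Int) = ((i+1 - m : Nat) : Int) + 1 := by omega
        rw [e]; omega
    by_cases hbr : l.getD (i+2) 0 > l.getD i 0
    · by_cases ha : dRun l (i+1) > 0 ∧ l.getD (i+2) 0 > l.getD (i+1) 0
      · have hE : dRun l (i+2) = max (dRun l (i+1) + 1) (uRun l i + 1) := by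
          simp only [dRun]; rw [if_pos ha, if_pos hbr]
        rcases le_total (dRun l (i+1) + 1) (uRun l i + 1) with h | h
        · exact hbridge hbr (by rw [hE]; omega)
        · exact hchain ha (by rw [hE]; omega)
      · have hE : dRun l (i+2) = max 0 (uRun l i + 1) := by
          simp only [dRun]; rw [if_neg ha, if_pos hbr]
        have := one_le_uRun l i
        exact hbridge hbr (by rw [hE]; omega)
    · by_cases ha : dRun l (i+1) > 0 ∧ l.getD (i+2) 0 > l.getD (i+1) 0
      · have hE : dRun l (i+2) = dRun l (i+1) + 1 := by
          simp only [dRun]; rw [if_pos ha, if_neg hbr]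
        exact hchain ha (by rw [hE])
      · have hE : dRun l (i+2) = 0 := by
          simp only [dRun]; rw [if_neg ha, if_neg hbr]
        omega

lemma le_bestB_u (l : List Int) {i k : Nat} (h : i ≤ k) : uRun l i ≤ bestB l k := by
  induction k with
  | zero => interval_cases i; simp [bestB, uRun]
  | succ k ih =>
    rcases Nat.eq_or_lt_of_le h with rfl | h'
    · simp only [bestB]
      have := le_max_right (bestB l k) (uRun l (k+1))
      exact le_trans this (le_max_left _ _)
    · have := ih (by omega)
      simp only [bestB]
      have h2 := le_max_left (max (bestB l k) (uRun l (k+1))) (dRun l (k+1))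
      have h3 := le_max_left (bestB l k) (uRun l (k+1))
      omega

lemma le_bestB_d (l : List Int) {i k : Nat} (h : i ≤ k) : dRun l i ≤ bestB l k := by
  induction k with
  | zero => interval_cases i; simp [bestB, dRun]
  | succ k ih =>
    rcases Nat.eq_or_lt_of_le h with rfl | h'
    · simp only [bestB]
      exact le_max_right _ _
    · have := ih (by omega)
      simp only [bestB]
      have h2 := le_max_left (max (bestB l k) (uRun l (k+1))) (dRun l (k+1))
      have h3 := le_max_left (bestB l k) (uRun l (k+1))
      omega

lemma bestB_le (l : List Int) (k : Nat) (c : Int)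
    (hu : ∀ i ≤ k, uRun l i ≤ c) (hd : ∀ i ≤ k, dRun l i ≤ c) : bestB l k ≤ c := by
  induction k with
  | zero => simpa [bestB, uRun] using hu 0 (le_refl 0)
  | succ k ih =>
    simp only [bestB]
    have h1 := ih (fun i hi => hu i (by omega)) (fun i hi => hd i (by omega))
    have h2 := hu (k+1) (le_refl _)
    have h3 := hd (k+1) (le_refl _)
    simp only [max_le_iff]
    exact ⟨⟨h1, h2⟩, h3⟩

-- ===== B-side: the fold computes bestB =====
lemma step_eq (l : List Int) (k : Nat) :
    solveAltStep (bestB l k, uRun l k, (if k = 0 then 0 else uRun l (k-1)), dRun l k, l.getD k 0,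
      (if k = 0 then none else some (l.getD (k-1) 0))) (l.getD (k+1) 0)
    = (bestB l (k+1), uRun l (k+1), uRun l k, dRun l (k+1), l.getD (k+1) 0, some (l.getD k 0)) := by
  match k with
  | 0 =>
    simp [solveAltStep, uRun, dRun, bestB]
  | (j+1) =>
    have hne : ¬ (j + 1 = 0) := by omega
    simp only [solveAltStep, if_neg hne, Nat.add_sub_cancel]
    simp only [uRun, dRun, bestB]

lemma alt_fold (l : List Int) : ∀ (n k : Nat), k < l.length → l.length - (k+1) = n →
    ((l.drop (k+1)).foldl solveAltStep
      (bestB l k, uRun l k, (if k = 0 then 0 else uRun l (k-1)), dRun l k, l.getD k 0,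
        (if k = 0 then none else some (l.getD (k-1) 0)))).1 = bestB l (l.length - 1) := by
  intro n
  induction n with
  | zero =>
    intro k hk hn
    rw [List.drop_eq_nil_of_le (by omega)]
    simp only [List.foldl_nil]
    rw [show l.length - 1 = k from by omega]
  | succ n ih =>
    intro k hk hn
    have hk1 : k + 1 < l.length := by omega
    rw [List.drop_eq_getElem_cons hk1, List.foldl_cons,
        show l[k+1] = l.getD (k+1) 0 from (List.getD_eq_getElem l 0 hk1).symm, step_eq]
    have := ih (k+1) hk1 (by omega)
    rw [if_neg (by omega : ¬ (k + 1 = 0)), Nat.add_sub_cancel] at this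
    exact this

lemma alt_eq_bestB (l : List Int) (hl : l ≠ []) : solve_alt l = bestB l (l.length - 1) := by
  match l, hl with
  | (h :: t), _ =>
    show (t.foldl solveAltStep (1, 1, 0, 0, h, none)).1 = _
    have h0 : (h :: t).length - (0+1) = t.length := by simp
    have := alt_fold (h :: t) t.length 0 (by simp) h0
    simpa [bestB, uRun, dRun] using this

-- ===== generic running-max-with-condition fold =====
lemma bfold_ge_init (xs : List Int) (p : Int → Prop) [DecidablePred p] (f : Int → Int) (a : Int) :
    a ≤ xs.foldl (fun acc i => if p i then max acc (f i) else acc) a := by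
  induction xs generalizing a with
  | nil => simp
  | cons x t ih =>
    simp only [List.foldl_cons]
    split_ifs with hp
    · exact le_trans (le_max_left _ _) (ih _)
    · exact ih _

lemma bfold_ge_mem (xs : List Int) (p : Int → Prop) [DecidablePred p] (f : Int → Int) (a : Int)
    {i : Int} (hi : i ∈ xs) (hp : p i) :
    f i ≤ xs.foldl (fun acc i => if p i then max acc (f i) else acc) a := by
  induction xs generalizing a with
  | nil => simp at hi
  | cons x t ih =>
    simp only [List.foldl_cons]
    rcases List.mem_cons.mp hi with rfl | hmem
    · rw [if_pos hp]
      exact le_trans (le_max_right _ _) (bfold_ge_init t p f _)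
    · split_ifs <;> exact ih _ hmem

lemma bfold_le (xs : List Int) (p : Int → Prop) [DecidablePred p] (f : Int → Int) (a c : Int)
    (ha : a ≤ c) (h : ∀ i ∈ xs, p i → f i ≤ c) :
    xs.foldl (fun acc i => if p i then max acc (f i) else acc) a ≤ c := by
  induction xs generalizing a with
  | nil => simpa
  | cons x t ih =>
    simp only [List.foldl_cons]
    have hx := fun hp => h x (List.mem_cons_self) hp
    have ht := fun i hi hp => h i (List.mem_cons_of_mem x hi) hp
    split_ifs with hp
    · exact ih _ (by simp only [max_le_iff]; exact ⟨ha, hx hp⟩) ht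
    · exact ih _ ha ht

-- ===== A-side arrays =====
lemma getD_replicate0 (n i : Nat) (hi : i < n) : (List.replicate n (1 : Int)).getD i 0 = 1 := by
  rw [List.getD_eq_getElem?_getD, List.getElem?_replicate, if_pos hi]
  rfl

lemma pfold (l : List Int) : ∀ (m : Nat), m + 1 ≤ l.length →
    (((PySem.List.pyRange 1 (m : Int) 1).foldl
        (fun p i => if PySem.List.pyGetD l i 0 > PySem.List.pyGetD l (i - 1) 0 then
            PySem.List.pySetD p i (PySem.List.pyGetD p (i - 1) 0 + 1) else p)
        (List.replicate l.length (1 : Int))).length = l.length ∧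
     ∀ i : Nat, i < l.length →
      ((PySem.List.pyRange 1 (m : Int) 1).foldl
        (fun p i => if PySem.List.pyGetD l i 0 > PySem.List.pyGetD l (i - 1) 0 then
            PySem.List.pySetD p i (PySem.List.pyGetD p (i - 1) 0 + 1) else p)
        (List.replicate l.length (1 : Int))).getD i 0 = if i < m then uRun l i else 1) := by
  intro m
  induction m with
  | zero =>
    intro _
    rw [PySem.List.pyRange_one_eq_nil (by norm_num)]
    refine ⟨by simp, fun i hi => ?_⟩
    rw [List.foldl_nil, getD_replicate0 _ _ hi, if_neg (Nat.not_lt_zero i)]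
  | succ m ihm =>
    intro hm
    rcases Nat.eq_zero_or_pos m with rfl | hmpos
    · rw [show ((0:Nat) + 1 : Nat) = (1:Nat) from rfl]
      rw [show ((1:Nat) : Int) = 1 from rfl, PySem.List.pyRange_one_eq_nil (by norm_num)]
      refine ⟨by simp, fun i hi => ?_⟩
      rw [List.foldl_nil, getD_replicate0 _ _ hi]
      split_ifs with h
      · interval_cases i; simp [uRun]
      · rfl
    · obtain ⟨hlen, hent⟩ := ihm (by omega)
      have hcast : ((m + 1 : Nat) : Int) = (m : Int) + 1 := by push_cast; ring
      rw [hcast, PySem.List.pyRange_one_succ_right (by exact_mod_cast hmpos), List.foldl_append,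
          List.foldl_cons, List.foldl_nil]
      set P := (PySem.List.pyRange 1 (m : Int) 1).foldl
        (fun p i => if PySem.List.pyGetD l i 0 > PySem.List.pyGetD l (i - 1) 0 then
            PySem.List.pySetD p i (PySem.List.pyGetD p (i - 1) 0 + 1) else p)
        (List.replicate l.length (1 : Int)) with hP
      have ecast : (m : Int) - 1 = ((m - 1 : Nat) : Int) := by omega
      have hm1 : m - 1 < l.length := by omega
      have hmlt : m < l.length := by omega
      obtain ⟨m', rfl⟩ : ∃ m', m = m' + 1 := ⟨m - 1, by omega⟩
      have hm'e : m' + 1 - 1 = m' := by omega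
      by_cases hc : l.getD (m'+1) 0 > l.getD m' 0
      · rw [if_pos (by
          rw [ecast]; simp only [PySem.List.pyGetD_natCast, hm'e]; exact hc)]
        rw [ecast]
        simp only [PySem.List.pyGetD_natCast, PySem.List.pySetD_natCast, hm'e]
        have hval : P.getD m' 0 = uRun l m' := by
          rw [hent m' (by omega), if_pos (by omega)]
        rw [hval]
        have huv : uRun l m' + 1 = uRun l (m'+1) := by
          simp only [uRun]; rw [if_pos hc]
        refine ⟨by simp [hlen], fun i hi => ?_⟩
        by_cases hieq : i = m' + 1
        · subst hieq
          rw [List.getD_eq_getElem?_getD, List.getElem?_set_self (by simp [hlen]; omega)]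
          simp only [Option.getD_some]
          rw [if_pos (by omega)]
          exact huv
        · rw [List.getD_eq_getElem?_getD, List.getElem?_set_ne (fun h => hieq h.symm),
              ← List.getD_eq_getElem?_getD, hent i hi]
          by_cases hilt : i < m' + 1
          · rw [if_pos hilt, if_pos (by omega)]
          · rw [if_neg hilt, if_neg (by omega)]
      · rw [if_neg (by
          rw [ecast]; simp only [PySem.List.pyGetD_natCast, hm'e]; exact hc)]
        refine ⟨hlen, fun i hi => ?_⟩
        rw [hent i hi]
        by_cases hieq : i = m' + 1
        · subst hieq
          rw [if_neg (by omega), if_pos (by omega)]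
          have : uRun l (m'+1) = 1 := by simp only [uRun]; rw [if_neg hc]
          omega
        · by_cases hilt : i < m' + 1
          · rw [if_pos hilt, if_pos (by omega)]
          · rw [if_neg hilt, if_neg (by omega)]

lemma aPrefix_length (l : List Int) (hl : l ≠ []) : (aPrefix l).length = l.length := by
  have h1 : 1 ≤ l.length := List.length_pos_of_ne_nil hl
  unfold aPrefix
  have e1 : PySem.List.len l - 1 = ((l.length - 1 : Nat) : Int) := by
    simp only [PySem.List.len_eq]; omega
  have e2 : PySem.List.pyRepeat [(1 : Int)] (PySem.List.len l) = List.replicate l.length (1 : Int) := by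
    rw [PySem.List.pyRepeat_singleton]
    simp [PySem.List.len_eq]
  rw [e1, e2]
  exact (pfold l (l.length - 1) (by omega)).1

lemma aPrefix_getD (l : List Int) (i : Nat) (hi : i < l.length) :
    (aPrefix l).getD i 0 = if i + 1 < l.length then uRun l i else 1 := by
  have h1 : 1 ≤ l.length := by omega
  unfold aPrefix
  have e1 : PySem.List.len l - 1 = ((l.length - 1 : Nat) : Int) := by
    simp only [PySem.List.len_eq]; omega
  have e2 : PySem.List.pyRepeat [(1 : Int)] (PySem.List.len l) = List.replicate l.length (1 : Int) := by
    rw [PySem.List.pyRepeat_singleton]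
    simp [PySem.List.len_eq]
  rw [e1, e2, (pfold l (l.length - 1) (by omega)).2 i hi]
  by_cases h : i + 1 < l.length
  · rw [if_pos (by omega), if_pos h]
  · rw [if_neg (by omega), if_neg h]

lemma sfold (l : List Int) : ∀ (m : Nat), m + 1 ≤ l.length → ∀ (s : List Int),
    s.length = l.length →
    (∀ i, i < l.length → s.getD i 0 = if m ≤ i then sRun l i else 1) →
    (((PySem.List.pyRange ((m : Int) - 1) (-1) (-1)).foldl
        (fun s i => if PySem.List.pyGetD l i 0 < PySem.List.pyGetD l (i + 1) 0 then
            PySem.List.pySetD s i (PySem.List.pyGetD s (i + 1) 0 + 1) else s) s).length = l.length ∧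
     ∀ i : Nat, i < l.length →
      ((PySem.List.pyRange ((m : Int) - 1) (-1) (-1)).foldl
        (fun s i => if PySem.List.pyGetD l i 0 < PySem.List.pyGetD l (i + 1) 0 then
            PySem.List.pySetD s i (PySem.List.pyGetD s (i + 1) 0 + 1) else s) s).getD i 0 = sRun l i) := by
  intro m
  induction m with
  | zero =>
    intro _ s hslen hs
    rw [show ((0:Nat) : Int) - 1 = (-1 : Int) from by norm_num,
        PySem.List.pyRange_neg_one_eq_nil (by norm_num)]
    refine ⟨by simpa using hslen, fun i hi => ?_⟩
    simpa using hs i hi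
  | succ m ihm =>
    intro hm s hslen hs
    have hcast : ((m + 1 : Nat) : Int) - 1 = (m : Int) := by push_cast; ring
    rw [hcast, PySem.List.pyRange_neg_one_cons (by omega), List.foldl_cons]
    have hm1 : m + 1 < l.length := by omega
    have ec : (m : Int) + 1 = ((m + 1 : Nat) : Int) := by push_cast; ring
    by_cases hc : l.getD m 0 < l.getD (m+1) 0
    · rw [if_pos (by rw [ec]; simp only [PySem.List.pyGetD_natCast]; exact hc)]
      rw [ec]
      simp only [PySem.List.pyGetD_natCast, PySem.List.pySetD_natCast]
      have hval : s.getD (m+1) 0 = sRun l (m+1) := by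
        rw [hs (m+1) hm1, if_pos (by omega)]
      rw [hval, show sRun l (m+1) + 1 = sRun l m from (sRun_succ l m hm1 hc).symm]
      refine ihm (by omega) _ (by simp [hslen]) (fun i hi => ?_)
      by_cases hieq : i = m
      · subst hieq
        rw [List.getD_eq_getElem?_getD, List.getElem?_set_self (by rw [hslen]; omega),
            Option.getD_some, if_pos (le_refl _)]
      · rw [List.getD_eq_getElem?_getD, List.getElem?_set_ne (fun h => hieq h.symm),
            ← List.getD_eq_getElem?_getD, hs i hi]
        by_cases him : m ≤ i
        · rw [if_pos (by omega), if_pos him]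
        · rw [if_neg (by omega), if_neg him]
    · rw [if_neg (by rw [ec]; simp only [PySem.List.pyGetD_natCast]; exact hc)]
      refine ihm (by omega) s hslen (fun i hi => ?_)
      rw [hs i hi]
      by_cases hieq : i = m
      · subst hieq
        rw [if_neg (by omega), if_pos (le_refl _),
            sRun_eq_one l _ (fun h => hc h.2)]
      · by_cases him : m ≤ i
        · rw [if_pos (by omega), if_pos him]
        · rw [if_neg (by omega), if_neg him]

lemma aSuffix_init (l : List Int) (h1 : 1 ≤ l.length) :
    ∀ i, i < l.length →
      (List.replicate l.length (1 : Int)).getD i 0 = if l.length - 1 ≤ i then sRun l i else 1 := by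
  intro i hi
  rw [getD_replicate0 _ _ hi]
  split_ifs with h
  · have hieq : i = l.length - 1 := by omega
    subst hieq
    rw [sRun_eq_one l _ (by omega)]
  · rfl

lemma aSuffix_unfold (l : List Int) (h1 : 1 ≤ l.length) :
    (aSuffix l).length = l.length ∧ ∀ i, i < l.length → (aSuffix l).getD i 0 = sRun l i := by
  unfold aSuffix
  have e1 : PySem.List.len l - 2 = (((l.length - 1 : Nat)) : Int) - 1 := by
    simp only [PySem.List.len_eq]; omega
  have e2 : PySem.List.pyRepeat [(1 : Int)] (PySem.List.len l) = List.replicate l.length (1 : Int) := by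
    rw [PySem.List.pyRepeat_singleton]
    simp [PySem.List.len_eq]
  rw [e1, e2]
  exact sfold l (l.length - 1) (by omega) _ (by simp) (aSuffix_init l h1)

lemma aSuffix_length (l : List Int) (hl : l ≠ []) : (aSuffix l).length = l.length :=
  (aSuffix_unfold l (List.length_pos_of_ne_nil hl)).1

lemma aSuffix_getD (l : List Int) (i : Nat) (hi : i < l.length) :
    (aSuffix l).getD i 0 = sRun l i :=
  (aSuffix_unfold l (by omega)).2 i hi



-- ===== VERDICT (by name: the statement is the Claim_ definition above) =====
theorem solve_spec : Claim_equal_solve := by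
  unfold Claim_equal_solve
  intro nums _ hpre
  unfold Spec_solve
  have hN : 1 ≤ nums.length := List.length_pos_of_ne_nil hpre
  rw [alt_eq_bestB nums hpre]
  unfold solve
  simp only [PySem.List.len_eq]
  -- name the two maxima
  obtain ⟨v, hv⟩ : ∃ v, PySem.List.max? (aPrefix nums) (fun x => x) = some v := by
    cases h : PySem.List.max? (aPrefix nums) (fun x => x) with
    | none =>
      exact absurd ((PySem.List.max?_eq_none_iff _ _).mp h)
        (by intro h0; rw [← List.length_eq_zero_iff, aPrefix_length nums hpre] at h0; omega)
    | some v => exact ⟨v, rfl⟩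
  obtain ⟨w, hw⟩ : ∃ w, PySem.List.max? (aSuffix nums) (fun x => x) = some w := by
    cases h : PySem.List.max? (aSuffix nums) (fun x => x) with
    | none =>
      exact absurd ((PySem.List.max?_eq_none_iff _ _).mp h)
        (by intro h0; rw [← List.length_eq_zero_iff, aSuffix_length nums hpre] at h0; omega)
    | some w => exact ⟨w, rfl⟩
  rw [hv, hw]
  simp only [Option.getD_some]
  set K := nums.length - 1 with hK
  -- v is one of the prefix entries, hence ≤ bestB
  have hvle : v ≤ bestB nums K := by
    obtain ⟨i, hilen, hie⟩ := List.mem_iff_getElem.mp (PySem.List.max?_mem hv)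
    rw [aPrefix_length nums hpre] at hilen
    have : (aPrefix nums).getD i 0 = v := by
      rw [List.getD_eq_getElem _ _ (by rw [aPrefix_length nums hpre]; exact hilen)]
      exact hie
    rw [aPrefix_getD nums i hilen] at this
    split_ifs at this
    · rw [← this]; exact le_bestB_u nums (by omega)
    · rw [← this]
      have h1 : uRun nums 0 = 1 := rfl
      have := le_bestB_u nums (show 0 ≤ K from by omega)
      omega
  -- every suffix run is ≤ bestB
  have hsle_best : ∀ j, j < nums.length → sRun nums j ≤ bestB nums K := by
    intro j hj
    have h1 := one_le_sRun nums j
    have h2 := sRun_le nums j hj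
    set k := (sRun nums j - 1).toNat with hkdef
    have hk : (k : Int) = sRun nums j - 1 := Int.toNat_of_nonneg (by omega)
    have hjk : j + k < nums.length := by omega
    have := u_of_s nums k j hjk (by omega)
    have := le_bestB_u nums (show j + k ≤ K from by omega)
    omega
  have hwle : w ≤ bestB nums K := by
    obtain ⟨j, hjlen, hje⟩ := List.mem_iff_getElem.mp (PySem.List.max?_mem hw)
    rw [aSuffix_length nums hpre] at hjlen
    have : (aSuffix nums).getD j 0 = w := by
      rw [List.getD_eq_getElem _ _ (by rw [aSuffix_length nums hpre]; exact hjlen)]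
      exact hje
    rw [aSuffix_getD nums j hjlen] at this
    rw [← this]
    exact hsle_best j hjlen
  -- w dominates every suffix run
  have hsle_w : ∀ j, j < nums.length → sRun nums j ≤ w := by
    intro j hj
    have hmem : (aSuffix nums)[j]'(by rw [aSuffix_length nums hpre]; exact hj) ∈ aSuffix nums :=
      List.getElem_mem _
    have := PySem.List.max?_isMax hw _ hmem
    rwa [← List.getD_eq_getElem _ 0, aSuffix_getD nums j hj] at this
  apply le_antisymm
  · -- A ≤ B
    apply bfold_le _ _ _ _ _ (max_le hvle hwle)
    intro i hi hp
    rw [PySem.List.mem_pyRange_one] at hi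
    obtain ⟨m, rfl⟩ : ∃ m : Nat, i = (m : Int) := ⟨i.toNat, (Int.toNat_of_nonneg (by omega)).symm⟩
    have hm1 : 1 ≤ m := by exact_mod_cast hi.1
    have hmN : m + 1 < nums.length := by
      have := hi.2; omega
    have ec1 : (m : Int) - 1 = ((m - 1 : Nat) : Int) := by omega
    have ec2 : (m : Int) + 1 = ((m + 1 : Nat) : Int) := by omega
    rw [ec1, ec2] at hp ⊢
    simp only [PySem.List.pyGetD_natCast] at hp ⊢
    rw [aPrefix_getD nums (m-1) (by omega), if_pos (by omega),
        aSuffix_getD nums (m+1) (by omega)]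
    -- the bridge is dominated by a one-deletion run
    have hb : nums.getD (m-1) 0 < nums.getD (m-1+2) 0 := by
      rw [show m - 1 + 2 = m + 1 from by omega]; exact hp
    have h1 := one_le_sRun nums (m+1)
    have h2 := sRun_le nums (m+1) (by omega)
    set k := (sRun nums (m+1) - 1).toNat with hkdef
    have hk : (k : Int) = sRun nums (m+1) - 1 := Int.toNat_of_nonneg (by omega)
    have hB2 := B2 nums k (m-1) hb (by rw [show m - 1 + 2 = m + 1 from by omega]; omega)
    rw [show m - 1 + 2 + k = m + 1 + k from by omega, show m - 1 = m - 1 from rfl] at hB2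
    have := le_bestB_d nums (show m + 1 + k ≤ K from by omega)
    omega
  · -- B ≤ A
    apply bestB_le
    · intro i hik
      have hilen : i < nums.length := by omega
      have h1 := one_le_uRun nums i
      have h2 := uRun_le nums i
      set k := (uRun nums i - 1).toNat with hkdef
      have hk : (k : Int) = uRun nums i - 1 := Int.toNat_of_nonneg (by omega)
      have hkle : k ≤ i := by omega
      have hL := L1s nums i (i - k) (by omega) hilen (by
        rw [show ((i - (i - k) : Nat) : Int) = (k : Int) from by omega]; omega)
      rw [show ((i - (i - k) : Nat) : Int) = (k : Int) from by omega] at hL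
      have h3 := one_le_sRun nums i
      have h4 := hsle_w (i - k) (by omega)
      have h5 := bfold_ge_init (PySem.List.pyRange 1 ((nums.length : Int) - 1) 1)
        (fun i => PySem.List.pyGetD nums (i - 1) 0 < PySem.List.pyGetD nums (i + 1) 0)
        (fun i => PySem.List.pyGetD (aPrefix nums) (i - 1) 0 + PySem.List.pyGetD (aSuffix nums) (i + 1) 0)
        (max v w)
      have h6 : w ≤ max v w := le_max_right v w
      omega
    · intro i hik
      have hilen : i < nums.length := by omega
      by_cases hdpos : 0 < dRun nums i
      · obtain ⟨m, hm1, hm2, hmb, hmd, hms⟩ := B1 nums i hilen hdpos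
        have hmem : ((m : Nat) : Int) ∈ PySem.List.pyRange 1 ((nums.length : Int) - 1) 1 := by
          rw [PySem.List.mem_pyRange_one]
          constructor <;> omega
        have hp : PySem.List.pyGetD nums ((m : Int) - 1) 0 < PySem.List.pyGetD nums ((m : Int) + 1) 0 := by
          rw [show (m : Int) - 1 = ((m - 1 : Nat) : Int) from by omega,
              show (m : Int) + 1 = ((m + 1 : Nat) : Int) from by omega]
          simp only [PySem.List.pyGetD_natCast]
          exact hmb
        have h5 := bfold_ge_mem (PySem.List.pyRange 1 ((nums.length : Int) - 1) 1)
          (fun i => PySem.List.pyGetD nums (i - 1) 0 < PySem.List.pyGetD nums (i + 1) 0)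
          (fun i => PySem.List.pyGetD (aPrefix nums) (i - 1) 0 + PySem.List.pyGetD (aSuffix nums) (i + 1) 0)
          (max v w) hmem hp
        simp only at h5
        rw [show (m : Int) - 1 = ((m - 1 : Nat) : Int) from by omega,
            show (m : Int) + 1 = ((m + 1 : Nat) : Int) from by omega] at h5
        simp only [PySem.List.pyGetD_natCast] at h5
        rw [aPrefix_getD nums (m-1) (by omega), if_pos (by omega),
            aSuffix_getD nums (m+1) (by omega)] at h5
        omega
      · have h1 : uRun nums 0 = 1 := rfl
        have h5 := bfold_ge_init (PySem.List.pyRange 1 ((nums.length : Int) - 1) 1)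
          (fun i => PySem.List.pyGetD nums (i - 1) 0 < PySem.List.pyGetD nums (i + 1) 0)
          (fun i => PySem.List.pyGetD (aPrefix nums) (i - 1) 0 + PySem.List.pyGetD (aSuffix nums) (i + 1) 0)
          (max v w)
        have h6 : (1:Int) ≤ max v w := by
          have h7 := one_le_sRun nums 0
          have h8 := hsle_w 0 (by omega)
          have h9 := le_max_right v w
          omega
        omega
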